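-- pv_equiv track=rewrite | github.com/krutarth-dev/Answer2 | Answer2.py | is_valid_string
-- ===== SOURCE A (Python) =====
-- def is_valid_string(s):
--     # Counting the frequency of each character
--     frequency = {}
--     for char in s:
--         frequency[char] = frequency.get(char, 0) + 1
--
--     # Counting the frequencies of the frequencies
--     freq_count = {}
--     for freq in frequency.values():
--         freq_count[freq] = freq_count.get(freq, 0) + 1
--
--     # If all characters have the same frequency, it's valid
--     if len(freq_count) == 1:
--         return "YES"
--
--     # If there are exactly two frequencies and one occurs only once,
--     # removing one character with that frequency makes it valid
--     if len(freq_count) == 2: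
--         if freq_count.get(1) == 1 or (1 in freq_count and freq_count[1] == 1):
--             return "YES"
--
--     return "NO"
-- ===== SOURCE B (Python) =====
-- def is_valid_string(s):
--     # Per-character frequencies, then positional analysis of the sorted
--     # frequency list instead of a second frequency-of-frequencies dict.
--     frequency = {}
--     for ch in s:
--         frequency[ch] = frequency.get(ch, 0) + 1
--     counts = sorted(frequency.values())
--     if not counts:
--         return "NO"
--     if counts[0] == counts[-1]:
--         return "YES"
--     if counts[0] == 1 and counts[1] != 1 and counts[1] == counts[-1]:
--         return "YES"
--     return "NO"
-- ===== Notes on version B (the rewrite author's own statement) =====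
-- stated objective: alternative
-- what changed: The second frequency-of-frequencies dictionary and its two len/get branch tests are replaced by sorting the frequency values once and deciding validity positionally from the first, second and last elements of the sorted list.
import Mathlib
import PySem

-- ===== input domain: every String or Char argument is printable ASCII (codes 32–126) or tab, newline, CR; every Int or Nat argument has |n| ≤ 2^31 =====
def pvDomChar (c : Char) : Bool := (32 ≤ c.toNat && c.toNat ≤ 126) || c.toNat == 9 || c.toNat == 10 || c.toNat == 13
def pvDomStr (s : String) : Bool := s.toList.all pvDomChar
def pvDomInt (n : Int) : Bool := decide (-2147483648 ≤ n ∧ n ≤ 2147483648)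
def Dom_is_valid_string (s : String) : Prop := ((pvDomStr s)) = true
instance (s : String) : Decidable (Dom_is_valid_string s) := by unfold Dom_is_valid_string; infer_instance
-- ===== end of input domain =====

-- B replaces A's second frequency-of-frequencies dict by a sort of the frequency
-- values followed by a positional analysis (first/second/last element); objective: alternative.

-- counting loop `d[x] = d.get(x, 0) + 1` shared verbatim by both Python sources
def pvCounter {α : Type} [BEq α] (l : List α) : PySem.Dict α Int :=
  l.foldl (fun d x => d.insert x (d.getD x 0 + 1)) ⟨[]⟩

-- ===== PORT A =====
def is_valid_string (s : String) : String :=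
  let frequency := pvCounter s.toList
  let freq_count := pvCounter frequency.values
  if freq_count.items.length = 1 then "YES"
  else if freq_count.items.length = 2 then
    if freq_count.get? 1 = some 1 ∨ (freq_count.contains 1 = true ∧ freq_count.get? 1 = some 1)
    then "YES" else "NO"
  else "NO"

-- ===== PORT B =====
def is_valid_string_alt (s : String) : String :=
  let frequency := pvCounter s.toList
  let counts := PySem.List.sorted frequency.values (fun v => v)
  if counts = [] then "NO"
  else if PySem.List.pyGet? counts 0 = PySem.List.pyGet? counts (-1) then "YES"
  else if PySem.List.pyGet? counts 0 = some 1 ∧ ¬ PySem.List.pyGet? counts 1 = some 1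
          ∧ PySem.List.pyGet? counts 1 = PySem.List.pyGet? counts (-1) then "YES"
  else "NO"

-- ===== PRECONDITION & SPEC =====
def Spec_is_valid_string (s : String) (out : String) : Prop := out = is_valid_string_alt s
instance (s : String) (out : String) : Decidable (Spec_is_valid_string s out) := by unfold Spec_is_valid_string; infer_instance

-- ===== CLAIM (what is proved, stated in full; the proofs are below) =====
def Claim_equal_is_valid_string : Prop := ∀ (s : String), Dom_is_valid_string s → Spec_is_valid_string s (is_valid_string s)

-- ===== LEMMAS AND PROOFS =====

-- first-occurrence dedup (proof helper: key order of pvCounter)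
def pvFO {α : Type} [BEq α] : List α → List α
  | [] => []
  | x :: t => x :: (pvFO t).filter (fun y => !(y == x))

theorem pvFO_mem {α : Type} [BEq α] [LawfulBEq α] (l : List α) (y : α) :
    y ∈ pvFO l ↔ y ∈ l := by
  induction l with
  | nil => simp [pvFO]
  | cons x t ih =>
    simp only [pvFO, List.mem_cons, List.mem_filter]
    by_cases hyx : y = x <;> simp [hyx, ih]

theorem pvFO_nodup {α : Type} [BEq α] [LawfulBEq α] (l : List α) : (pvFO l).Nodup := by
  induction l with
  | nil => simp [pvFO]
  | cons x t ih =>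
    simp only [pvFO, List.nodup_cons]
    refine ⟨?_, ih.filter _⟩
    intro hx
    simp at hx

theorem pvFO_append_singleton {α : Type} [BEq α] [LawfulBEq α] (l : List α) (x : α) :
    pvFO (l ++ [x]) = if x ∈ l then pvFO l else pvFO l ++ [x] := by
  induction l with
  | nil => simp [pvFO]
  | cons a t ih =>
    simp only [List.cons_append, pvFO, ih, List.mem_cons]
    by_cases hxt : x ∈ t
    · simp [hxt]
    · by_cases hxa : x = a
      · subst hxa
        simp [hxt, List.filter_append]
      · simp [hxt, hxa, List.filter_append]

theorem pvCounter_items {α : Type} [BEq α] [LawfulBEq α] (l : List α) :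
    (pvCounter l).items = (pvFO l).map (fun k => (k, (l.count k : Int))) := by
  induction l using List.reverseRecOn with
  | nil => simp [pvCounter, pvFO]
  | append_singleton l x ih =>
    have hstep : pvCounter (l ++ [x])
        = (pvCounter l).insert x ((pvCounter l).getD x 0 + 1) := by
      simp [pvCounter, List.foldl_append]
    have hfind : ∀ (g : α → Int),
        List.find? (fun p => p.1 == x) ((pvFO l).map (fun k => (k, g k)))
          = ((pvFO l).find? (fun k => k == x)).map (fun k => (k, g k)) := by
      intro g
      rw [List.find?_map]
      rfl
    have hfo : (pvFO l).find? (fun k => k == x)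
        = if x ∈ l then some x else none := by
      by_cases hx : x ∈ l
      · have hx' : x ∈ pvFO l := (pvFO_mem l x).mpr hx
        rw [if_pos hx]
        cases hfind2 : (pvFO l).find? (fun k => k == x) with
        | none =>
          have := List.find?_eq_none.mp hfind2 x hx'
          simp at this
        | some y =>
          have hy := List.find?_some hfind2
          simp at hy
          rw [hy]
      · rw [if_neg hx]
        apply List.find?_eq_none.mpr
        intro y hy
        have : y ∈ l := (pvFO_mem l y).mp hy
        simp only [ne_eq]
        intro hyx; exact hx (eq_of_beq hyx ▸ this)
    have hgetD : (pvCounter l).getD x 0 = (l.count x : Int) ∨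
        ((pvCounter l).getD x 0 = 0 ∧ x ∉ l) := by
      by_cases hx : x ∈ l
      · left
        simp [PySem.Dict.getD, PySem.Dict.get?, ih, hfind, hfo, hx]
      · right
        refine ⟨?_, hx⟩
        simp [PySem.Dict.getD, PySem.Dict.get?, ih, hfind, hfo, hx]
    have hcontains : (pvCounter l).contains x = decide (x ∈ l) := by
      simp only [PySem.Dict.contains, ih, List.any_map]
      by_cases hx : x ∈ l
      · simp only [hx, decide_true]
        have hx' : x ∈ pvFO l := (pvFO_mem l x).mpr hx
        exact List.any_eq_true.mpr ⟨x, hx', by simp⟩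
      · simp only [hx, decide_false]
        apply List.any_eq_false.mpr
        intro y hy
        have : y ∈ l := (pvFO_mem l y).mp hy
        simp only [Function.comp, ne_eq]
        intro hyx; exact hx (eq_of_beq hyx ▸ this)
    rw [hstep, PySem.Dict.insert]
    by_cases hx : x ∈ l
    · rw [if_pos (by rw [hcontains]; simp [hx])]
      rcases hgetD with hg | ⟨_, hx'⟩
      · rw [pvFO_append_singleton, if_pos hx, ih, hg, List.map_map]
        apply List.map_congr_left
        intro k hk
        by_cases hkx : k = x
        · subst hkx
          simp [List.count_append]
        · simp [Function.comp, hkx, List.count_append, Ne.symm hkx]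
      · exact absurd hx hx'
    · rw [if_neg (by rw [hcontains]; simp [hx])]
      have hg0 : (pvCounter l).getD x 0 = 0 := by
        rcases hgetD with hg | ⟨hg, _⟩
        · rw [List.count_eq_zero_of_not_mem hx] at hg
          simpa using hg
        · exact hg
      rw [pvFO_append_singleton, if_neg hx, ih, List.map_append, hg0]
      have hmap : List.map (fun k => (k, ((l ++ [x]).count k : Int))) (pvFO l)
          = List.map (fun k => (k, (l.count k : Int))) (pvFO l) := by
        apply List.map_congr_left
        intro k hk
        have hkx : k ≠ x := fun h => hx (h ▸ (pvFO_mem l k).mp hk)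
        simp [List.count_append, Ne.symm hkx]
      show List.map (fun k => (k, (l.count k : Int))) (pvFO l) ++ [(x, 0 + 1)]
          = List.map (fun k => (k, ((l ++ [x]).count k : Int))) (pvFO l)
            ++ List.map (fun k => (k, ((l ++ [x]).count k : Int))) [x]
      rw [hmap]
      simp [List.count_append, List.count_eq_zero_of_not_mem hx]

theorem pvCounter_values {α : Type} [BEq α] [LawfulBEq α] (l : List α) :
    (pvCounter l).values = (pvFO l).map (fun k => (l.count k : Int)) := by
  simp [PySem.Dict.values, pvCounter_items, List.map_map, Function.comp]

theorem pvCounter_len {α : Type} [BEq α] [LawfulBEq α] [DecidableEq α] (l : List α) :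
    (pvCounter l).items.length = l.toFinset.card := by
  rw [pvCounter_items, List.length_map]
  have h1 : (pvFO l).toFinset = l.toFinset := by
    ext y; simp [pvFO_mem]
  rw [← List.toFinset_card_of_nodup (pvFO_nodup l), h1]

theorem pvCounter_get? {α : Type} [BEq α] [LawfulBEq α] (l : List α) (x : α) :
    (pvCounter l).get? x = if x ∈ l then some ((l.count x : Int)) else none := by
  have hfind : List.find? (fun p => p.1 == x)
      ((pvFO l).map (fun k => (k, (l.count k : Int))))
      = ((pvFO l).find? (fun k => k == x)).map (fun k => (k, (l.count k : Int))) := by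
    rw [List.find?_map]; rfl
  by_cases hx : x ∈ l
  · have hx' : x ∈ pvFO l := (pvFO_mem l x).mpr hx
    cases hfind2 : (pvFO l).find? (fun k => k == x) with
    | none =>
      have := List.find?_eq_none.mp hfind2 x hx'
      simp at this
    | some y =>
      have hy := List.find?_some hfind2
      simp at hy
      subst hy
      simp [PySem.Dict.get?, pvCounter_items, hfind, hfind2, hx]
  · have : (pvFO l).find? (fun k => k == x) = none := by
      apply List.find?_eq_none.mpr
      intro y hy
      have : y ∈ l := (pvFO_mem l y).mp hy
      simp only [ne_eq]
      intro hyx; exact hx (eq_of_beq hyx ▸ this)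
    simp [PySem.Dict.get?, pvCounter_items, hfind, this, hx]

-- pyGet? on the concrete indices B uses
theorem pyGet?_zero_cons (x : Int) (t : List Int) :
    PySem.List.pyGet? (x :: t) 0 = some x := by
  simp [PySem.List.pyGet?, PySem.List.pyIdx?]

theorem pyGet?_one_cons_cons (x y : Int) (u : List Int) :
    PySem.List.pyGet? (x :: y :: u) 1 = some y := by
  simp [PySem.List.pyGet?, PySem.List.pyIdx?]

theorem pyGet?_neg_one (l : List Int) (h : l ≠ []) :
    PySem.List.pyGet? l (-1) = some (l.getLast h) := by
  have hl : 0 < l.length := List.length_pos_iff.mpr h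
  simp only [PySem.List.pyGet?, PySem.List.pyIdx?]
  rw [if_neg (by omega), if_pos (by omega)]
  simp only [Option.bind_some]
  rw [show (-(-1 : Int)).toNat = 1 from rfl]
  rw [← List.getLast?_eq_getElem?, List.getLast?_eq_getLast_of_ne_nil h]

theorem le_getLast_of_pairwise (c : List Int) (h : c.Pairwise (· ≤ ·)) (hne : c ≠ [])
    (z : Int) (hz : z ∈ c) : z ≤ c.getLast hne := by
  induction c with
  | nil => simp at hz
  | cons x t ih =>
    rcases List.pairwise_cons.mp h with ⟨hx, ht⟩
    cases t with
    | nil => simp at hz; simp [hz]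
    | cons y u =>
      rw [List.getLast_cons (by simp)]
      rcases List.mem_cons.mp hz with hzx | hzt
      · subst hzx
        exact le_trans (hx _ (List.getLast_mem _)) (le_refl _)
      · exact ih ht (by simp) hzt

theorem head_le_of_pairwise (x : Int) (t : List Int) (h : (x :: t).Pairwise (· ≤ ·))
    (z : Int) (hz : z ∈ x :: t) : x ≤ z := by
  rcases List.mem_cons.mp hz with hzx | hzt
  · simp [hzx]
  · exact (List.pairwise_cons.mp h).1 z hzt

-- all elements equal the head when head = last on a sorted list
theorem sorted_all_eq (x : Int) (t : List Int) (h : (x :: t).Pairwise (· ≤ ·))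
    (hxl : x = (x :: t).getLast (by simp)) (z : Int) (hz : z ∈ x :: t) : z = x := by
  have h1 := head_le_of_pairwise x t h z hz
  have h2 := le_getLast_of_pairwise (x :: t) h (by simp) z hz
  omega

-- the combinatorial core: A's branch chain equals B's on any positive value list
theorem branches_eq (vals : List Int) (hpos : ∀ v ∈ vals, 1 ≤ v) :
    (if (pvCounter vals).items.length = 1 then "YES"
     else if (pvCounter vals).items.length = 2 then
       if (pvCounter vals).get? 1 = some 1 ∨
          ((pvCounter vals).contains 1 = true ∧ (pvCounter vals).get? 1 = some 1)
       then "YES" else "NO"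
     else "NO")
    = (let counts := PySem.List.sorted vals (fun v => v)
       if counts = [] then "NO"
       else if PySem.List.pyGet? counts 0 = PySem.List.pyGet? counts (-1) then "YES"
       else if PySem.List.pyGet? counts 0 = some 1 ∧ ¬ PySem.List.pyGet? counts 1 = some 1
               ∧ PySem.List.pyGet? counts 1 = PySem.List.pyGet? counts (-1) then "YES"
       else "NO") := by
  have hperm : (PySem.List.sorted vals (fun v => v)).Perm vals :=
    PySem.List.sorted_perm vals (fun v => v) false
  have hpw : (PySem.List.sorted vals (fun v => v)).Pairwise (· ≤ ·) :=
    PySem.List.sorted_pairwise vals (fun v => v)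
  have hfin : (PySem.List.sorted vals (fun v => v)).toFinset = vals.toFinset :=
    List.toFinset_eq_of_perm _ _ hperm
  have hcnt : (PySem.List.sorted vals (fun v => v)).count 1 = vals.count 1 :=
    hperm.count_eq 1
  have hlen := pvCounter_len vals
  have hget := pvCounter_get? vals 1
  -- A's whole condition is `vals.count 1 = 1`
  have hcond : ((pvCounter vals).get? 1 = some 1 ∨
      ((pvCounter vals).contains 1 = true ∧ (pvCounter vals).get? 1 = some 1))
      ↔ vals.count 1 = 1 := by
    constructor
    · rintro (h | ⟨_, h⟩) <;>
      · rw [hget] at h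
        by_cases h1 : (1 : Int) ∈ vals
        · rw [if_pos h1] at h
          exact_mod_cast Option.some_injective _ h
        · rw [if_neg h1] at h; exact absurd h (by simp)
    · intro h
      left
      have h1 : (1 : Int) ∈ vals := by
        rw [← List.count_pos_iff]; omega
      rw [hget, if_pos h1, h]
      rfl
  simp only [hlen, hcond]
  cases hc : PySem.List.sorted vals (fun v => v) with
  | nil =>
    have hv : vals = [] := (hc ▸ hperm).symm.eq_nil
    subst hv
    simp
  | cons x t =>
    rw [hc] at hperm hpw hfin hcnt
    have hne : x :: t ≠ [] := by simp
    have hposc : ∀ v ∈ x :: t, 1 ≤ v := fun v hv => hpos v (hperm.subset hv)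
    rw [if_neg hne, pyGet?_zero_cons, pyGet?_neg_one _ hne]
    by_cases hxl : x = (x :: t).getLast hne
    · -- all equal: both YES
      have hall := sorted_all_eq x t hpw hxl
      have hcard1 : vals.toFinset.card = 1 := by
        rw [← hfin]
        have h1 : (x :: t).toFinset = {x} := by
          ext z
          simp only [List.mem_toFinset, Finset.mem_singleton]
          exact ⟨fun hz => hall z hz, fun hz => hz ▸ List.mem_cons_self⟩
        rw [h1, Finset.card_singleton]
      rw [if_pos hcard1, if_pos (show some x = some ((x :: t).getLast hne) by rw [← hxl])]
    · have hcard_ne1 : vals.toFinset.card ≠ 1 := by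
        rw [← hfin]
        intro h1
        rcases Finset.card_eq_one.mp h1 with ⟨a, ha⟩
        have hx : x ∈ (x :: t).toFinset := by simp
        have hl : (x :: t).getLast hne ∈ (x :: t).toFinset :=
          List.mem_toFinset.mpr (List.getLast_mem hne)
        rw [ha] at hx hl
        simp only [Finset.mem_singleton] at hx hl
        exact hxl (hx.trans hl.symm)
      rw [if_neg hcard_ne1,
        if_neg (show ¬ some x = some ((x :: t).getLast hne) by simpa using hxl)]
      cases t with
      | nil => exact absurd rfl hxl
      | cons y u =>
        rw [pyGet?_one_cons_cons]
        have hne' : x :: y :: u ≠ [] := by simp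
        have hyle : ∀ z ∈ y :: u, y ≤ z := fun z hz =>
          head_le_of_pairwise y u (List.pairwise_cons.mp hpw).2 z hz
        by_cases hB : x = 1 ∧ ¬ y = 1 ∧ y = (x :: y :: u).getLast hne'
        · obtain ⟨hx1, hy1, hyl⟩ := hB
          have hall : ∀ z ∈ y :: u, z = y := by
            intro z hz
            have h2 : z ≤ (x :: y :: u).getLast hne' :=
              le_getLast_of_pairwise _ hpw hne' z (List.mem_cons_of_mem x hz)
            have := hyle z hz
            omega
          have hfin2 : (x :: y :: u).toFinset = {x, y} := by
            ext z
            simp only [List.mem_toFinset, List.mem_cons, Finset.mem_insert,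
              Finset.mem_singleton]
            constructor
            · rintro (h | h)
              · left; exact h
              · right; exact hall z (by simpa using h)
            · rintro (h | h)
              · left; exact h
              · right; left; exact h
          have hxy : x ≠ y := by omega
          have hcard : vals.toFinset.card = 2 := by
            rw [← hfin, hfin2, Finset.card_insert_of_notMem (by simp [hxy]),
              Finset.card_singleton]
          have hcount : vals.count 1 = 1 := by
            rw [← hcnt]
            have hzero : (y :: u).count 1 = 0 := by
              rw [List.count_eq_zero]
              intro h1
              have := hall 1 h1
              omega
            rw [List.count_cons, hzero, hx1]
            simp
          rw [if_pos hcard, if_pos hcount,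
            if_pos (show some x = some 1 ∧ ¬ some y = some 1
              ∧ some y = some ((x :: y :: u).getLast hne) from
              ⟨by rw [hx1], by simpa using hy1, congrArg _ hyl⟩)]
        · rw [if_neg (show ¬ (some x = some 1 ∧ ¬ some y = some 1
              ∧ some y = some ((x :: y :: u).getLast hne)) by
            intro ⟨h1, h2, h3⟩
            exact hB ⟨Option.some_injective _ h1,
              by simpa using h2, Option.some_injective _ h3⟩)]
          by_cases hcard2 : vals.toFinset.card = 2
          · rw [if_pos hcard2, if_neg]
            intro hcount
            rw [← hcnt] at hcount
            apply hB
            have hx1 : x = 1 := by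
              have h1m : (1 : Int) ∈ x :: y :: u := by
                rw [← List.count_pos_iff]; omega
              have := head_le_of_pairwise x (y :: u) hpw 1 h1m
              have := hposc x List.mem_cons_self
              omega
            have hy1 : ¬ y = 1 := by
              intro hy
              rw [List.count_cons, List.count_cons, hx1, hy] at hcount
              simp at hcount
            refine ⟨hx1, hy1, ?_⟩
            by_contra hyl
            have hxy : x ≠ y := by omega
            have hsub : ({x, y, (x :: y :: u).getLast hne'} : Finset Int)
                ⊆ (x :: y :: u).toFinset := by
              intro z hz
              simp only [Finset.mem_insert, Finset.mem_singleton] at hz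
              rcases hz with h | h | h
              · simp [h]
              · simp [h]
              · rw [h]; exact List.mem_toFinset.mpr (List.getLast_mem hne')
            have h3 : ({x, y, (x :: y :: u).getLast hne'} : Finset Int).card = 3 := by
              rw [Finset.card_insert_of_notMem (by
                  simp only [Finset.mem_insert, Finset.mem_singleton]
                  push Not
                  exact ⟨hxy, by simpa using hxl⟩),
                Finset.card_insert_of_notMem (by simpa using hyl),
                Finset.card_singleton]
            have hle := Finset.card_le_card hsub
            rw [← hfin] at hcard2
            omega
          · rw [if_neg hcard2]

-- values of a character counter are positive
theorem pvCounter_values_pos (l : List Char) :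
    ∀ v ∈ (pvCounter l).values, 1 ≤ v := by
  intro v hv
  rw [pvCounter_values] at hv
  rcases List.mem_map.mp hv with ⟨k, hk, hkv⟩
  have : k ∈ l := (pvFO_mem l k).mp hk
  have : 0 < l.count k := List.count_pos_iff.mpr this
  omega

-- ===== VERDICT (by name: the statement is the Claim_ definition above) =====
theorem is_valid_string_spec : Claim_equal_is_valid_string := by
  intro s _
  unfold Spec_is_valid_string is_valid_string is_valid_string_alt
  exact branches_eq (pvCounter s.toList).values (pvCounter_values_pos s.toList)
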